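-- pv_equiv track=rewrite | github.com/jlevines/J.-Levine-Slack-App | Zaps/[Lead] Round Robin Follow-Up.py | slack_encode
-- ===== SOURCE A (Python) =====
-- def slack_encode(text):
--     keys = {
--         "<": "&lt;",
--         ">": "&gt;"
--     }
--     text = text.replace("&", "&amp;")
--     for key in keys:
--         text = text.replace(key, keys[key])
--     return text
-- ===== SOURCE B (Python) =====
-- def slack_encode(text):
--     mapping = {"&": "&amp;", "<": "&lt;", ">": "&gt;"}
--     return "".join(mapping.get(c, c) for c in text)
-- ===== Notes on version B (the rewrite author's own statement) =====
-- stated objective: idiomatic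
-- what changed: Replaced A's three ordered full-string .replace passes with a single character-by-character pass that maps each character through a dict and joins the pieces.
import Mathlib
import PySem

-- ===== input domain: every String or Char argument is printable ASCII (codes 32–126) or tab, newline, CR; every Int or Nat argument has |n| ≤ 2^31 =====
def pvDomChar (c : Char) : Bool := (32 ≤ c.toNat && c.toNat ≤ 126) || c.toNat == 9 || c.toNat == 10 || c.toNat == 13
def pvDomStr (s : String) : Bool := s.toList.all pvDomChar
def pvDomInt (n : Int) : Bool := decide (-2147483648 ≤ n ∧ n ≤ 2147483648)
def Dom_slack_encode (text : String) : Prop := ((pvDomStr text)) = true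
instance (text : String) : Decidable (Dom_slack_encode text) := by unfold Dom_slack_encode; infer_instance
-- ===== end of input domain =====

-- B replaces A's three ordered full-string .replace passes with a single per-character
-- dict-mapping pass joined at the end (objective: idiomatic single traversal).

-- ===== PORT A =====
-- A: replace "&" first, then loop over the dict's keys ("<", ">") replacing each by its entity.
-- keys[key] is ported as getD with default "" — the default is never used since key ∈ keys.
def slack_encode (text : String) : String :=
  let keys : PySem.Dict String String := ⟨[("<", "&lt;"), (">", "&gt;")]⟩
  let text1 := PySem.Str.replace text "&" "&amp;"
  (PySem.Dict.keys keys).foldl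
    (fun t key => PySem.Str.replace t key (PySem.Dict.getD keys key "")) text1

-- ===== PORT B =====
-- B: one pass — each character is looked up in the mapping dict (default: itself) and the
-- pieces are joined with "".
def slack_encode_alt (text : String) : String :=
  let mapping : PySem.Dict Char String := ⟨[('&', "&amp;"), ('<', "&lt;"), ('>', "&gt;")]⟩
  PySem.Str.join "" (text.toList.map (fun c => PySem.Dict.getD mapping c (String.ofList [c])))

-- ===== PRECONDITION & SPEC =====
def Spec_slack_encode (text : String) (out : String) : Prop := out = slack_encode_alt text
instance (text : String) (out : String) : Decidable (Spec_slack_encode text out) := by unfold Spec_slack_encode; infer_instance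

-- ===== CLAIM (what is proved, stated in full; the proofs are below) =====
def Claim_equal_slack_encode : Prop := ∀ (text : String), Dom_slack_encode text → Spec_slack_encode text (slack_encode text)

-- ===== LEMMAS AND PROOFS =====

-- single-character substitution as a flatMap
def pvSub (c : Char) (new : List Char) (x : Char) : List Char :=
  if x = c then new else [x]

-- the whole-character mapping B performs
def pvMap (x : Char) : List Char :=
  if x = '&' then "&amp;".toList
  else if x = '<' then "&lt;".toList
  else if x = '>' then "&gt;".toList
  else [x]

lemma go_single (c : Char) (new : List Char) :
    ∀ (fuel : Nat) (s acc : List Char), s.length ≤ fuel →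
      PySem.Chars.replace.go [c] new fuel s acc
        = acc.reverse ++ s.flatMap (pvSub c new) := by
  intro fuel
  induction fuel with
  | zero =>
    intro s acc h
    have : s = [] := List.eq_nil_of_length_eq_zero (Nat.le_zero.mp h)
    subst this
    simp [PySem.Chars.replace.go]
  | succ n ih =>
    intro s acc h
    cases s with
    | nil => simp [PySem.Chars.replace.go]
    | cons x t =>
      simp only [PySem.Chars.replace.go]
      by_cases hx : x = c
      · subst hx
        have hpre : List.isPrefixOf [x] (x :: t) = true := by
          simp [List.isPrefixOf]
        simp only [hpre, if_true]
        rw [ih _ _ (by simpa using Nat.le_of_succ_le_succ h)]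
        simp [pvSub, List.flatMap_cons]
      · have hpre : List.isPrefixOf [c] (x :: t) = false := by
          simp [List.isPrefixOf]
          exact fun hcx => absurd hcx.symm hx
        simp only [hpre, Bool.false_eq_true, if_false]
        rw [ih _ _ (by simpa using Nat.le_of_succ_le_succ h)]
        simp [pvSub, hx, List.flatMap_cons]

lemma replace_single (c : Char) (new s : List Char) :
    PySem.Chars.replace s [c] new = s.flatMap (pvSub c new) := by
  simp only [PySem.Chars.replace, List.isEmpty_cons, Bool.false_eq_true, if_false]
  simpa using go_single c new s.length s [] (le_refl _)

lemma join_empty_map (l : List Char) (f : Char → List Char) :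
    PySem.Chars.join [] (l.map f) = l.flatMap f := by
  induction l with
  | nil => simp [PySem.Chars.join, List.intercalate]
  | cons x t ih =>
    simp only [PySem.Chars.join, List.intercalate] at *
    cases t with
    | nil => simp
    | cons y u =>
      simp only [List.map_cons, List.intersperse, List.flatten_cons,
        List.flatMap_cons] at *
      simp [ih]

lemma alt_toList (text : String) :
    (slack_encode_alt text).toList = text.toList.flatMap pvMap := by
  unfold slack_encode_alt
  rw [PySem.Str.toList_join]
  have : (text.toList.map (fun c => PySem.Dict.getD ⟨[('&', "&amp;"), ('<', "&lt;"), ('>', "&gt;")]⟩ c (String.ofList [c]))).map String.toList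
      = text.toList.map pvMap := by
    simp only [List.map_map]
    apply List.map_congr_left
    intro x _
    by_cases h1 : x = '&'
    · subst h1; simp [PySem.Dict.getD, PySem.Dict.get?, pvMap]
    · by_cases h2 : x = '<'
      · subst h2; simp [PySem.Dict.getD, PySem.Dict.get?, pvMap]
      · by_cases h3 : x = '>'
        · subst h3; simp [PySem.Dict.getD, PySem.Dict.get?, pvMap]
        · have b1 : ('&' == x) = false := by simp [Ne.symm h1]
          have b2 : ('<' == x) = false := by simp [Ne.symm h2]
          have b3 : ('>' == x) = false := by simp [Ne.symm h3]
          simp [PySem.Dict.getD, PySem.Dict.get?, pvMap, h1, h2, h3, List.find?, b1, b2, b3]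
  have e0 : ("" : String).toList = [] := by decide
  rw [e0, this, join_empty_map]

lemma a_toList (text : String) :
    (slack_encode text).toList
      = ((text.toList.flatMap (pvSub '&' "&amp;".toList)).flatMap
          (pvSub '<' "&lt;".toList)).flatMap (pvSub '>' "&gt;".toList) := by
  unfold slack_encode
  simp only [PySem.Dict.keys, List.map, List.foldl]
  rw [PySem.Str.toList_replace, PySem.Str.toList_replace, PySem.Str.toList_replace]
  have hlt : PySem.Dict.getD (⟨[("<", "&lt;"), (">", "&gt;")]⟩ : PySem.Dict String String) "<" "" = "&lt;" := by
    decide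
  have hgt : PySem.Dict.getD (⟨[("<", "&lt;"), (">", "&gt;")]⟩ : PySem.Dict String String) ">" "" = "&gt;" := by
    decide
  rw [hlt, hgt]
  have h1 : ("<" : String).toList = ['<'] := by decide
  have h2 : (">" : String).toList = ['>'] := by decide
  have h3 : ("&" : String).toList = ['&'] := by decide
  rw [h1, h2, h3, replace_single, replace_single, replace_single]

lemma pointwise (x : Char) :
    ((pvSub '&' "&amp;".toList x).flatMap (pvSub '<' "&lt;".toList)).flatMap
      (pvSub '>' "&gt;".toList) = pvMap x := by
  by_cases h1 : x = '&'
  · subst h1; decide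
  · by_cases h2 : x = '<'
    · subst h2; decide
    · by_cases h3 : x = '>'
      · subst h3; decide
      · simp [pvSub, pvMap, h1, h2, h3]

lemma comp_eq (l : List Char) :
    ((l.flatMap (pvSub '&' "&amp;".toList)).flatMap (pvSub '<' "&lt;".toList)).flatMap
      (pvSub '>' "&gt;".toList) = l.flatMap pvMap := by
  rw [List.flatMap_assoc, List.flatMap_assoc]
  apply List.flatMap_congr
  intro x _
  rw [← List.flatMap_assoc]
  exact pointwise x

-- ===== VERDICT (by name: the statement is the Claim_ definition above) =====
theorem slack_encode_spec : Claim_equal_slack_encode := by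
  intro text _
  unfold Spec_slack_encode
  have h : (slack_encode text).toList = (slack_encode_alt text).toList := by
    rw [a_toList, alt_toList, comp_eq]
  exact String.toList_inj.mp h
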